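-- pv_equiv track=rewrite | github.com/roemmele/AbLit | scripts/dataset_creation/pack_final_dataset.py | restore_paragraph_breaks_in_segs
-- ===== SOURCE A (Python) =====
-- def restore_paragraph_breaks_in_segs(par_nums, segs):
--     '''First go through the segments and add line breaks where there are paragraph breaks,
--     to make the subsequent processing steps easier.'''
--
--     n_seg_groups = len(segs)
--     cur_par_num = None
--     prev_nonempty_group_i = None
--     prev_seg_i = None
--
--     for group_i in range(n_seg_groups):
--         for seg_i, (par_num, seg) in enumerate(zip(par_nums[group_i], segs[group_i])):
--             if par_num != cur_par_num:
--                 if cur_par_num != None: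
--                     segs[prev_nonempty_group_i][prev_seg_i] += "\n"
--                 cur_par_num = par_num
--
--             prev_nonempty_group_i = group_i
--             prev_seg_i = seg_i
--
--     return segs
-- ===== SOURCE B (Python) =====
-- def restore_paragraph_breaks_in_segs(par_nums, segs):
--     '''Build the flat list of (group, seg index, paragraph number) records once,
--     then append "\n" wherever consecutive records change paragraph number.
--     Mutates segs in place and returns it, like the original.'''
--     records = []
--     for group_i in range(len(segs)):
--         for seg_i, (par_num, _seg) in enumerate(zip(par_nums[group_i], segs[group_i])):
--             records.append((group_i, seg_i, par_num))
--     for (g1, s1, p1), (_, _, p2) in zip(records, records[1:]):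
--         if p1 != p2:
--             segs[g1][s1] += "\n"
--     return segs
-- ===== Notes on version B (the rewrite author's own statement) =====
-- stated objective: alternative
-- what changed: Replaces A's fused single loop with running cur_par_num/prev-position state by a two-phase decomposition: build the flat (group, seg index, par_num) record list once, then a pairwise pass over consecutive records appending the newline wherever the paragraph number changes.
import Mathlib
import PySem

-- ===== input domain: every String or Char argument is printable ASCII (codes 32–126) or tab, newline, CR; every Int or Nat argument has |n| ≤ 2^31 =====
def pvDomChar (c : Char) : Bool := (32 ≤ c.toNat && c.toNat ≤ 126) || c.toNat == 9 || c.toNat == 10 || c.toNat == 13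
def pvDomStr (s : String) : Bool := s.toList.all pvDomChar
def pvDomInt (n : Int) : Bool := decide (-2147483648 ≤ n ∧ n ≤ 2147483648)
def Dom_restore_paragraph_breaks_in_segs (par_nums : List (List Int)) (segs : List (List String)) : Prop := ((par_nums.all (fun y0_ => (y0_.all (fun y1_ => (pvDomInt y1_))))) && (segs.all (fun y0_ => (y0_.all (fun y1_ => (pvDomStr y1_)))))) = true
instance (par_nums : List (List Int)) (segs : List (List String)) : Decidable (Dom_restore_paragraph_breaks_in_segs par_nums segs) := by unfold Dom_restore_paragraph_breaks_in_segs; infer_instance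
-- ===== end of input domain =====

-- B replaces A's fused change-detection loop (running cur/prev state) by a two-phase
-- decomposition: build the flat record list once, then a pairwise pass over consecutive records; same cost.
-- Both Pythons mutate segs in place and return it; the equivalence proved is about the return value.

-- ===== PORT A =====
-- segs[g][s] += "\n"  (structural update; indices are always in range when A performs it)
def pvModifyAt {α : Type} (f : α → α) : Nat → List α → List α
  | _, [] => []
  | 0, x :: xs => f x :: xs
  | n+1, x :: xs => x :: pvModifyAt f n xs

def applyBreak (segs : List (List String)) (g s : Nat) : List (List String) :=
  pvModifyAt (fun row => pvModifyAt (fun t => t ++ "\n") s row) g segs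

-- zip(par_nums[g], segs[g]); the '.getD []' branch is only reached where Python raises
-- IndexError (excluded by Pre_)
def zipAt (par_nums : List (List Int)) (segs : List (List String)) (g : Nat) : List (Int × String) :=
  ((PySem.List.pyGet? par_nums (g : Int)).getD []).zip ((PySem.List.pyGet? segs (g : Int)).getD [])

-- the inner 'for seg_i, (par_num, seg) in enumerate(zip(...))' loop of A, threading
-- (cur_par_num, prev_nonempty_group_i/prev_seg_i, segs); the 'none' prev branch is unreachable
-- (prev is set whenever cur is)
def innerA (g : Nat) : List (Int × String) → Nat → Option Int → Option (Nat × Nat) →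
    List (List String) → Option Int × Option (Nat × Nat) × List (List String)
  | [], _, cur, prev, segs => (cur, prev, segs)
  | (p, _) :: rest, s, cur, prev, segs =>
    if some p ≠ cur then
      innerA g rest (s+1) (some p) (some (g, s))
        (match cur, prev with
         | some _, some (pg, ps) => applyBreak segs pg ps
         | _, _ => segs)
    else
      innerA g rest (s+1) cur (some (g, s)) segs

-- 'for group_i in range(n_seg_groups)'
def outerA (pns : List (List Int)) (n : Nat) (g : Nat) (cur : Option Int)
    (prev : Option (Nat × Nat)) (segs : List (List String)) :
    Option Int × Option (Nat × Nat) × List (List String) :=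
  if _h : g < n then
    let st := innerA g (zipAt pns segs g) 0 cur prev segs
    outerA pns n (g+1) st.1 st.2.1 st.2.2
  else (cur, prev, segs)
  termination_by n - g

def restore_paragraph_breaks_in_segs (par_nums : List (List Int)) (segs : List (List String)) : List (List String) :=
  (outerA par_nums segs.length 0 none none segs).2.2

-- ===== PORT B =====
-- phase 1: records.append((group_i, seg_i, par_num)) over enumerate(zip(par_nums[g], segs[g]))
def recsOf (g : Nat) : Nat → List (Int × String) → List (Nat × Nat × Int)
  | _, [] => []
  | s, (p, _) :: rest => (g, s, p) :: recsOf g (s+1) rest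

def buildRecs (pns : List (List Int)) (segs : List (List String)) (n : Nat) (g : Nat) :
    List (Nat × Nat × Int) :=
  if _h : g < n then recsOf g 0 (zipAt pns segs g) ++ buildRecs pns segs n (g+1) else []
  termination_by n - g

-- phase 2: for (g1,s1,p1),(_,_,p2) in zip(records, records[1:]): if p1 != p2: segs[g1][s1] += "\n"
def pass2 : List (Nat × Nat × Int) → List (List String) → List (List String)
  | (g1, s1, p1) :: r2 :: rest, segs =>
      pass2 (r2 :: rest) (if p1 ≠ r2.2.2 then applyBreak segs g1 s1 else segs)
  | _, segs => segs

def restore_paragraph_breaks_in_segs_alt (par_nums : List (List Int)) (segs : List (List String)) : List (List String) :=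
  pass2 (buildRecs par_nums segs segs.length 0) segs

-- ===== PRECONDITION & SPEC =====
-- A raises IndexError (par_nums[group_i]) exactly when par_nums has fewer groups than segs;
-- those inputs are excluded (B raises there too).
def Pre_restore_paragraph_breaks_in_segs (par_nums : List (List Int)) (segs : List (List String)) : Prop :=
  segs.length ≤ par_nums.length
instance (par_nums : List (List Int)) (segs : List (List String)) : Decidable (Pre_restore_paragraph_breaks_in_segs par_nums segs) := by unfold Pre_restore_paragraph_breaks_in_segs; infer_instance

def pvWitness_restore_paragraph_breaks_in_segs : List (List Int) × List (List String) :=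
  ([[1, 1, 2], [2, 3]], [["a", "b", "c"], ["d", "e"]])

def Spec_restore_paragraph_breaks_in_segs (par_nums : List (List Int)) (segs : List (List String)) (out : List (List String)) : Prop := out = restore_paragraph_breaks_in_segs_alt par_nums segs
instance (par_nums : List (List Int)) (segs : List (List String)) (out : List (List String)) : Decidable (Spec_restore_paragraph_breaks_in_segs par_nums segs out) := by unfold Spec_restore_paragraph_breaks_in_segs; infer_instance

-- ===== CLAIM (what is proved, stated in full; the proofs are below) =====
def Claim_equal_restore_paragraph_breaks_in_segs : Prop := ∀ (par_nums : List (List Int)) (segs : List (List String)), Dom_restore_paragraph_breaks_in_segs par_nums segs → Pre_restore_paragraph_breaks_in_segs par_nums segs → Spec_restore_paragraph_breaks_in_segs par_nums segs (restore_paragraph_breaks_in_segs par_nums segs)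

-- ===== LEMMAS AND PROOFS =====

-- generic record-stream version of A's loop body (proof device)
def stepA : List (Nat × Nat × Int) → Option Int → Option (Nat × Nat) → List (List String) →
    Option Int × Option (Nat × Nat) × List (List String)
  | [], cur, prev, segs => (cur, prev, segs)
  | (g, s, p) :: rest, cur, prev, segs =>
    if some p ≠ cur then
      stepA rest (some p) (some (g, s))
        (match cur, prev with
         | some _, some (pg, ps) => applyBreak segs pg ps
         | _, _ => segs)
    else stepA rest cur (some (g, s)) segs

theorem innerA_eq_stepA (g : Nat) (zs : List (Int × String)) :
    ∀ s cur prev segs, innerA g zs s cur prev segs = stepA (recsOf g s zs) cur prev segs := by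
  induction zs with
  | nil => intro s cur prev segs; simp [innerA, recsOf, stepA]
  | cons hd tl ih =>
      intro s cur prev segs
      obtain ⟨p, str⟩ := hd
      by_cases h : some p ≠ cur
      · simp only [innerA, recsOf, stepA, if_pos h]; exact ih _ _ _ _
      · simp only [innerA, recsOf, stepA, if_neg h]; exact ih _ _ _ _

theorem stepA_append (R1 R2 : List (Nat × Nat × Int)) :
    ∀ cur prev segs, stepA (R1 ++ R2) cur prev segs =
      stepA R2 (stepA R1 cur prev segs).1 (stepA R1 cur prev segs).2.1 (stepA R1 cur prev segs).2.2 := by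
  induction R1 with
  | nil => intro cur prev segs; simp [stepA]
  | cons hd tl ih =>
      intro cur prev segs
      obtain ⟨g, s, p⟩ := hd
      by_cases h : some p ≠ cur
      · simp only [List.cons_append, stepA, if_pos h]; exact ih _ _ _
      · simp only [List.cons_append, stepA, if_neg h]; exact ih _ _ _

theorem length_pvModifyAt {α : Type} (f : α → α) : ∀ (n : Nat) (xs : List α),
    (pvModifyAt f n xs).length = xs.length := by
  intro n xs
  induction xs generalizing n with
  | nil => simp [pvModifyAt]
  | cons x xs ih => cases n <;> simp [pvModifyAt, ih]

theorem shape_applyBreak (segs : List (List String)) : ∀ (g s : Nat),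
    (applyBreak segs g s).map List.length = segs.map List.length := by
  induction segs with
  | nil => intro g s; simp [applyBreak, pvModifyAt]
  | cons row rest ih =>
      intro g s
      cases g with
      | zero => simp [applyBreak, pvModifyAt, length_pvModifyAt]
      | succ g' =>
          simp only [applyBreak, pvModifyAt, List.map_cons]
          have := ih g' s
          simp only [applyBreak] at this
          simp [this]

theorem shape_stepA (R : List (Nat × Nat × Int)) : ∀ cur prev segs,
    ((stepA R cur prev segs).2.2).map List.length = segs.map List.length := by
  induction R with
  | nil => intro cur prev segs; simp [stepA]
  | cons hd tl ih =>
      intro cur prev segs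
      obtain ⟨g, s, p⟩ := hd
      by_cases h : some p ≠ cur
      · simp only [stepA, if_pos h]
        rw [ih]
        cases cur with
        | none => rfl
        | some c =>
            cases prev with
            | none => rfl
            | some pr => obtain ⟨pg, ps⟩ := pr; exact shape_applyBreak segs pg ps
      · simp only [stepA, if_neg h]; exact ih _ _ _

theorem recsOf_zip_eq (g : Nat) (pn : List Int) :
    ∀ (r1 r2 : List String), r1.length = r2.length →
      ∀ s, recsOf g s (pn.zip r1) = recsOf g s (pn.zip r2) := by
  induction pn with
  | nil => intro r1 r2 _ s; simp [recsOf]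
  | cons p ps ih =>
      intro r1 r2 hlen s
      cases r1 with
      | nil => cases r2 with
        | nil => rfl
        | cons _ _ => simp at hlen
      | cons a as =>
          cases r2 with
          | nil => simp at hlen
          | cons b bs =>
              simp only [List.zip_cons_cons, recsOf]
              simp only [List.length_cons, Nat.add_right_cancel_iff] at hlen
              rw [ih as bs hlen (s+1)]

theorem zipAt_recsOf_eq (pns : List (List Int)) (segs1 segs2 : List (List String))
    (hsh : segs1.map List.length = segs2.map List.length) (g s : Nat) :
    recsOf g s (zipAt pns segs1 g) = recsOf g s (zipAt pns segs2 g) := by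
  unfold zipAt
  apply recsOf_zip_eq
  have h1 : (segs1.map List.length)[g]? = (segs2.map List.length)[g]? := by rw [hsh]
  simp only [List.getElem?_map] at h1
  simp only [PySem.List.pyGet?_natCast]
  cases e1 : segs1[g]? with
  | none => cases e2 : segs2[g]? with
    | none => simp
    | some r2 => rw [e1, e2] at h1; simp at h1
  | some r1 =>
      cases e2 : segs2[g]? with
      | none => rw [e1, e2] at h1; simp at h1
      | some r2 =>
          rw [e1, e2] at h1
          simp only [Option.map_some, Option.some.injEq] at h1
          simp [h1]

theorem buildRecs_shape_eq (pns : List (List Int)) (n : Nat) :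
    ∀ (g : Nat) (segs1 segs2 : List (List String)),
      segs1.map List.length = segs2.map List.length →
      buildRecs pns segs1 n g = buildRecs pns segs2 n g := by
  intro g
  induction hk : n - g using Nat.strong_induction_on generalizing g with
  | _ k ihk =>
    intro segs1 segs2 hsh
    by_cases h : g < n
    · conv_lhs => rw [buildRecs]
      conv_rhs => rw [buildRecs]
      simp only [dif_pos h]
      have hz := zipAt_recsOf_eq pns segs1 segs2 hsh g 0
      rw [hz]
      congr 1
      exact ihk (n - (g+1)) (by omega) (g+1) rfl segs1 segs2 hsh
    · conv_lhs => rw [buildRecs]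
      conv_rhs => rw [buildRecs]
      simp only [dif_neg h]

theorem outerA_eq (pns : List (List Int)) (n : Nat) :
    ∀ (g : Nat) cur prev segs,
      outerA pns n g cur prev segs = stepA (buildRecs pns segs n g) cur prev segs := by
  intro g
  induction hk : n - g using Nat.strong_induction_on generalizing g with
  | _ k ihk =>
    intro cur prev segs
    by_cases h : g < n
    · conv_lhs => rw [outerA]
      conv_rhs => rw [buildRecs]
      simp only [dif_pos h]
      rw [innerA_eq_stepA, stepA_append]
      set st := stepA (recsOf g 0 (zipAt pns segs g)) cur prev segs with hst
      have hsh : (st.2.2).map List.length = segs.map List.length := by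
        rw [hst]; exact shape_stepA _ _ _ _
      rw [ihk (n - (g+1)) (by omega) (g+1) rfl st.1 st.2.1 st.2.2,
          buildRecs_shape_eq pns n (g+1) st.2.2 segs hsh]
    · conv_lhs => rw [outerA]
      conv_rhs => rw [buildRecs]
      simp only [dif_neg h]; simp [stepA]

theorem stepA_run (rest : List (Nat × Nat × Int)) :
    ∀ (g0 s0 : Nat) (p0 : Int) segs,
      (stepA rest (some p0) (some (g0, s0)) segs).2.2 = pass2 ((g0, s0, p0) :: rest) segs := by
  induction rest with
  | nil => intro g0 s0 p0 segs; simp [stepA, pass2]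
  | cons hd tl ih =>
      intro g0 s0 p0 segs
      obtain ⟨g, s, p⟩ := hd
      by_cases h : p0 = p
      · have h' : ¬ (some p ≠ some p0) := by simp [h]
        have h2 : ¬ (p0 ≠ p) := by simp [h]
        simp only [stepA, if_neg h', pass2, if_neg h2]
        rw [h]
        exact ih g s p segs
      · have h' : some p ≠ some p0 := by simp; exact fun e => h e.symm
        simp only [stepA, if_pos h', pass2, if_pos h]
        exact ih g s p _

theorem stepA_none (R : List (Nat × Nat × Int)) (segs : List (List String)) :
    (stepA R none none segs).2.2 = pass2 R segs := by
  cases R with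
  | nil => simp [stepA, pass2]
  | cons hd tl =>
      obtain ⟨g, s, p⟩ := hd
      have h : some p ≠ (none : Option Int) := by simp
      simp only [stepA, if_pos h]
      exact stepA_run tl g s p segs

-- ===== VERDICT (by name: the statement is the Claim_ definition above) =====
theorem restore_paragraph_breaks_in_segs_spec : Claim_equal_restore_paragraph_breaks_in_segs := by
  intro par_nums segs _ _
  unfold Spec_restore_paragraph_breaks_in_segs
  unfold restore_paragraph_breaks_in_segs restore_paragraph_breaks_in_segs_alt
  rw [outerA_eq, stepA_none]
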